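-- pv_equiv track=rewrite | github.com/stebach/AdventOfCode | years/2015/day16/solve_2015_16.py | find_valid_entries
-- ===== SOURCE A (Python) =====
-- def find_valid_entries(data, use_ranges = False):
--     result = []
--     for entry in data:
--         valid = True
--         for key in entry[1]:
--             if key == 'children' and entry[1][key] != 3:
--                 valid = False
--                 break
--             if (key == 'cats' and entry[1][key] != 7 and use_ranges is False):
--                 valid = False
--                 break
--             if (key == 'cats' and entry[1][key] <= 7 and use_ranges is True):
--                 valid = False
--                 break
--             if key == 'samoyeds' and entry[1][key] != 2:
--                 valid = False
--                 break
--             if (key == 'pomeranians' and entry[1][key] != 3 and use_ranges is False):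
--                 valid = False
--                 break
--             if (key == 'pomeranians' and entry[1][key] >= 3 and use_ranges is True):
--                 valid = False
--                 break
--             if key == 'akitas' and entry[1][key] != 0:
--                 valid = False
--                 break
--             if key == 'vizslas' and entry[1][key] != 0:
--                 valid = False
--                 break
--             if (key == 'goldfish' and entry[1][key] != 5 and use_ranges is False):
--                 valid = False
--                 break
--             if (key == 'goldfish' and entry[1][key] >= 5 and use_ranges is True):
--                 valid = False
--                 break
--             if (key == 'trees' and entry[1][key] != 3 and use_ranges is False):
--                 valid = False
--                 break
--             if (key == 'trees' and entry[1][key] <= 3 and use_ranges is True):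
--                 valid = False
--                 break
--             if key == 'cars' and entry[1][key] != 2:
--                 valid = False
--                 break
--             if key == 'perfumes' and entry[1][key] != 1:
--                 valid = False
--                 break
--         if valid:
--             result.append(entry[0])
--     return result
-- ===== SOURCE B (Python) =====
-- def find_valid_entries(data, use_ranges=False):
--     # Staged filtering: start from the whole list and apply one filter pass per
--     # constraint (constraint-major traversal), then project out the names.
--     survivors = list(data)
--     for key, want in (('children', 3), ('samoyeds', 2), ('akitas', 0),
--                       ('vizslas', 0), ('cars', 2), ('perfumes', 1)):
--         survivors = [e for e in survivors if key not in e[1] or e[1][key] == want]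
--     if use_ranges is True:
--         for key, lo in (('cats', 7), ('trees', 3)):
--             survivors = [e for e in survivors if key not in e[1] or e[1][key] > lo]
--         for key, hi in (('pomeranians', 3), ('goldfish', 5)):
--             survivors = [e for e in survivors if key not in e[1] or e[1][key] < hi]
--     elif use_ranges is False:
--         for key, want in (('cats', 7), ('pomeranians', 3), ('goldfish', 5), ('trees', 3)):
--             survivors = [e for e in survivors if key not in e[1] or e[1][key] == want]
--     return [name for name, _ in survivors]
-- ===== Notes on version B (the rewrite author's own statement) =====
-- stated objective: alternative
-- what changed: Replaces A's entry-major single pass with a break-on-first-mismatch 14-branch if-cascade by constraint-major staged filtering: the survivor list is narrowed by one whole-list list-comprehension pass per property constraint (the four range constraints chosen by the use_ranges is True/is False/else test), and names are projected at the end.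
import Mathlib
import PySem

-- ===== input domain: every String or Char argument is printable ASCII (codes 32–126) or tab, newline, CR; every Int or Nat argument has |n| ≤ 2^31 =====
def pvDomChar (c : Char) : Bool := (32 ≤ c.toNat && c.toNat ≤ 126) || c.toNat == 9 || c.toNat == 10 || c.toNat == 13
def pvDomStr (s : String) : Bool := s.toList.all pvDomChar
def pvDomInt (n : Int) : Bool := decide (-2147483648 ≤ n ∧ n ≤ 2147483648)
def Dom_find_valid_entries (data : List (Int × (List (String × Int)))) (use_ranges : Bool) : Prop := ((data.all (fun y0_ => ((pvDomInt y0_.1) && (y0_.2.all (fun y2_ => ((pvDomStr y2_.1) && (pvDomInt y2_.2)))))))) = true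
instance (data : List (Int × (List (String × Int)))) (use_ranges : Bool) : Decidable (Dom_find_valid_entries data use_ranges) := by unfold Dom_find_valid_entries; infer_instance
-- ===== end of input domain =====

-- B replaces A's entry-major pass (break-on-first-mismatch if-cascade per entry) by
-- constraint-major staged filtering: one whole-list filter pass per property constraint,
-- then a final projection to names; objective: alternative, same cost.

-- ===== PORT A =====
-- inner 'for key in entry[1]' loop with its break: first failing guard returns False
def pvCheckA (u : Bool) : List (String × Int) → Bool
  | [] => true
  | (k, v) :: rest =>
    if k == "children" && v != 3 then false
    else if k == "cats" && v != 7 && !u then false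
    else if k == "cats" && decide (v ≤ 7) && u then false
    else if k == "samoyeds" && v != 2 then false
    else if k == "pomeranians" && v != 3 && !u then false
    else if k == "pomeranians" && decide (3 ≤ v) && u then false
    else if k == "akitas" && v != 0 then false
    else if k == "vizslas" && v != 0 then false
    else if k == "goldfish" && v != 5 && !u then false
    else if k == "goldfish" && decide (5 ≤ v) && u then false
    else if k == "trees" && v != 3 && !u then false
    else if k == "trees" && decide (v ≤ 3) && u then false
    else if k == "cars" && v != 2 then false
    else if k == "perfumes" && v != 1 then false
    else pvCheckA u rest

def find_valid_entries (data : List (Int × (List (String × Int)))) (use_ranges : Bool) : List Int :=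
  data.foldl (fun result entry =>
    if pvCheckA use_ranges entry.2 then result ++ [entry.1] else result) []

-- ===== PORT B =====
-- one staged filter pass: keep entries whose 'key' property (if present) satisfies 'ok'
-- ('key not in props or ok(props[key])'; on a dict every stored pair of that key is the key's pair)
def pvPass (key : String) (ok : Int → Bool) (s : List (Int × (List (String × Int)))) :
    List (Int × (List (String × Int))) :=
  s.filter (fun e => e.2.all (fun p => p.1 != key || ok p.2))

def find_valid_entries_alt (data : List (Int × (List (String × Int)))) (use_ranges : Bool) : List Int :=
  let s1 := [("children", (3:Int)), ("samoyeds", 2), ("akitas", 0),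
             ("vizslas", 0), ("cars", 2), ("perfumes", 1)].foldl
              (fun s kw => pvPass kw.1 (fun v => v == kw.2) s) data
  let s2 :=
    if use_ranges then
      let sa := [("cats", (7:Int)), ("trees", 3)].foldl
                  (fun s kw => pvPass kw.1 (fun v => decide (kw.2 < v)) s) s1
      [("pomeranians", (3:Int)), ("goldfish", 5)].foldl
        (fun s kw => pvPass kw.1 (fun v => decide (v < kw.2)) s) sa
    else
      [("cats", (7:Int)), ("pomeranians", 3), ("goldfish", 5), ("trees", 3)].foldl
        (fun s kw => pvPass kw.1 (fun v => v == kw.2) s) s1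
  s2.map (·.1)

-- ===== PRECONDITION & SPEC =====
def Spec_find_valid_entries (data : List (Int × (List (String × Int)))) (use_ranges : Bool) (out : List Int) : Prop := out = find_valid_entries_alt data use_ranges
instance (data : List (Int × (List (String × Int)))) (use_ranges : Bool) (out : List Int) : Decidable (Spec_find_valid_entries data use_ranges out) := by unfold Spec_find_valid_entries; infer_instance

-- ===== CLAIM =====
def Claim_equal_find_valid_entries : Prop := ∀ (data : List (Int × (List (String × Int)))) (use_ranges : Bool), Dom_find_valid_entries data use_ranges → Spec_find_valid_entries data use_ranges (find_valid_entries data use_ranges)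

-- ===== LEMMAS AND PROOFS =====
-- the per-pair condition that one entry-pair (k, v) must satisfy, as the conjunction of
-- the ten per-constraint checks that B's staged passes impose on it
def pvPairOk (u : Bool) (k : String) (v : Int) : Bool :=
  (k != "children" || v == 3) && (k != "samoyeds" || v == 2) && (k != "akitas" || v == 0) &&
  (k != "vizslas" || v == 0) && (k != "cars" || v == 2) && (k != "perfumes" || v == 1) &&
  (if u then
    (k != "cats" || decide (7 < v)) && (k != "trees" || decide (3 < v)) &&
    (k != "pomeranians" || decide (v < 3)) && (k != "goldfish" || decide (v < 5))
   else
    (k != "cats" || v == 7) && (k != "pomeranians" || v == 3) &&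
    (k != "goldfish" || v == 5) && (k != "trees" || v == 3))

lemma pvCheckA_cons (u : Bool) (k : String) (v : Int) (rest : List (String × Int)) :
    pvCheckA u ((k, v) :: rest) = (pvPairOk u k v && pvCheckA u rest) := by
  by_cases h1 : k = "children"
  · subst h1; cases u <;> simp [pvCheckA, pvPairOk] <;> by_cases hv : v = 3 <;> simp [hv]
  · by_cases h2 : k = "cats"
    · subst h2; cases u <;> simp [pvCheckA, pvPairOk]
      · by_cases hv : v = 7 <;> simp [hv]
      · by_cases hv : v ≤ 7 <;> by_cases hv' : 7 < v <;> first | omega | simp [hv, hv']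
    · by_cases h3 : k = "samoyeds"
      · subst h3; cases u <;> simp [pvCheckA, pvPairOk] <;> by_cases hv : v = 2 <;> simp [hv]
      · by_cases h4 : k = "pomeranians"
        · subst h4; cases u <;> simp [pvCheckA, pvPairOk]
          · by_cases hv : v = 3 <;> simp [hv]
          · by_cases hv : 3 ≤ v <;> by_cases hv' : v < 3 <;> first | omega | simp [hv, hv']
        · by_cases h5 : k = "akitas"
          · subst h5; cases u <;> simp [pvCheckA, pvPairOk] <;> by_cases hv : v = 0 <;> simp [hv]
          · by_cases h6 : k = "vizslas"
            · subst h6; cases u <;> simp [pvCheckA, pvPairOk] <;> by_cases hv : v = 0 <;> simp [hv]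
            · by_cases h7 : k = "goldfish"
              · subst h7; cases u <;> simp [pvCheckA, pvPairOk]
                · by_cases hv : v = 5 <;> simp [hv]
                · by_cases hv : 5 ≤ v <;> by_cases hv' : v < 5 <;> first | omega | simp [hv, hv']
              · by_cases h8 : k = "trees"
                · subst h8; cases u <;> simp [pvCheckA, pvPairOk]
                  · by_cases hv : v = 3 <;> simp [hv]
                  · by_cases hv : v ≤ 3 <;> by_cases hv' : 3 < v <;> first | omega | simp [hv, hv']
                · by_cases h9 : k = "cars"
                  · subst h9; cases u <;> simp [pvCheckA, pvPairOk] <;> by_cases hv : v = 2 <;> simp [hv]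
                  · by_cases h10 : k = "perfumes"
                    · subst h10; cases u <;> simp [pvCheckA, pvPairOk] <;> by_cases hv : v = 1 <;> simp [hv]
                    · cases u <;>
                        simp [pvCheckA, pvPairOk, h1, h2, h3, h4, h5, h6, h7, h8, h9, h10]

lemma pvCheckA_eq_all (u : Bool) (l : List (String × Int)) :
    pvCheckA u l = l.all (fun p => pvPairOk u p.1 p.2) := by
  induction l with
  | nil => rfl
  | cons p rest ih => cases p with
    | mk k v => rw [pvCheckA_cons, ih]; simp

-- Bool 'all' over one list splits across a pointwise conjunction (used to merge B's staged passes)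
lemma pv_all_band (l : List (String × Int)) (p q : (String × Int) → Bool) :
    (l.all p && l.all q) = l.all (fun x => p x && q x) := by
  induction l with
  | nil => simp
  | cons a t ih => simp only [List.all_cons, ← ih]; ac_rfl

-- B's composed staged filters keep exactly the entries whose every pair satisfies pvPairOk
lemma alt_eq_filter (data : List (Int × (List (String × Int)))) (u : Bool) :
    find_valid_entries_alt data u
      = (data.filter (fun e => e.2.all (fun p => pvPairOk u p.1 p.2))).map (·.1) := by
  unfold find_valid_entries_alt pvPass
  cases u <;>
    · simp only [List.foldl_cons, List.foldl_nil, if_true, List.filter_filter]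
      congr 1
      apply List.filter_congr
      intro e _
      simp only [pv_all_band]
      refine List.all_congr rfl (fun p => ?_)
      cases p with
      | mk k v => simp only [pvPairOk, if_true]; ac_rfl

-- ===== VERDICT =====
theorem find_valid_entries_spec : Claim_equal_find_valid_entries := by
  intro data u _
  unfold Spec_find_valid_entries find_valid_entries
  rw [PySem.List.foldl_append_if, alt_eq_filter]
  simp only [List.nil_append]
  congr 1
  apply List.filter_congr
  intro e _
  rw [pvCheckA_eq_all]
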